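-- pv_equiv track=rewrite | github.com/Shelcov/advanced | function.py | variants
-- ===== SOURCE A (Python) =====
-- def variants(symbols, depth, current_depth=0):
--     if not symbols or current_depth >= depth:
--         yield ''
--     for item in symbols:
--         sym = symbols.copy()
--         sym.remove(item)
--         for tail in variants(sym, depth, current_depth + 1):
--             yield item + tail
-- ===== SOURCE B (Python) =====
-- def variants(symbols, depth, current_depth=0):
--     stack = [(list(symbols), current_depth, '')]
--     while stack:
--         syms, cd, prefix = stack.pop()
--         if not syms or cd >= depth:
--             yield prefix
--         for item in reversed(syms):
--             child = syms.copy()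
--             child.remove(item)
--             stack.append((child, cd + 1, prefix + item))
-- ===== Notes on version B (the rewrite author's own statement) =====
-- stated objective: alternative
-- what changed: The recursive generator is replaced by an iterative explicit-stack DFS: each frame carries (remaining symbols, depth counter, accumulated prefix), children are pushed in reverse so the LIFO pop reproduces A's exact yield order.
import Mathlib
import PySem

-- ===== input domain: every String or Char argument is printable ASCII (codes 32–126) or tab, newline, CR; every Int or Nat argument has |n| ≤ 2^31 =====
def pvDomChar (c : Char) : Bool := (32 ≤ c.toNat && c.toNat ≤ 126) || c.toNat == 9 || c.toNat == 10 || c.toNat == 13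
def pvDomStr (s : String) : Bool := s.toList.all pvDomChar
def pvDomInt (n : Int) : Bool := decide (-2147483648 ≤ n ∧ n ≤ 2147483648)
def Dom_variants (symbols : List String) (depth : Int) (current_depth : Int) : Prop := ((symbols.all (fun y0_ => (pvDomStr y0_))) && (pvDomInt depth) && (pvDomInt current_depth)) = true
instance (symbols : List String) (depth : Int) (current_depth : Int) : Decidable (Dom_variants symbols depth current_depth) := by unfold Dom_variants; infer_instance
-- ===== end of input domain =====

-- B replaces A's recursive generator by an iterative explicit-stack DFS with the same yield order
-- (objective: alternative decomposition, not faster). Both are proved to return the same list.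

-- ===== PORT A =====
-- A's recursive generator, collected into a list. The fuel argument (symbols.length + 1) is only a
-- totality guard: each recursive call is on a list one element shorter, so fuel is never exhausted.
def variantsGo (fuel : Nat) (symbols : List String) (depth : Int) (current_depth : Int) : List String :=
  match fuel with
  | 0 => []
  | fuel + 1 =>
    (if symbols = [] ∨ current_depth ≥ depth then [""] else []) ++
    symbols.foldl (fun acc item =>
      acc ++ (match PySem.List.remove? symbols item with
        | some sym => (variantsGo fuel sym depth (current_depth + 1)).map (fun tail => item ++ tail)
        | none => [])) []

def variants (symbols : List String) (depth : Int) (current_depth : Int) : List String :=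
  variantsGo (symbols.length + 1) symbols depth current_depth

-- ===== PORT B =====
-- nodesB n bounds the number of stack pops B performs starting from a list of length n
-- (1 for the popped frame plus n child subtrees); it is only a totality guard for the loop.
def nodesB : Nat → Nat
  | 0 => 1
  | n + 1 => 1 + (n + 1) * nodesB n

-- the while-loop of Source B; the stack is a list with its top at the head (pop = head, append = cons)
def variantsAltGo (fuel : Nat) (depth : Int) (stack : List (List String × Int × String)) : List String :=
  match fuel with
  | 0 => []
  | fuel + 1 =>
    match stack with
    | [] => []
    | (syms, cd, pre) :: rest =>
      (if syms = [] ∨ cd ≥ depth then [pre] else []) ++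
      variantsAltGo fuel depth
        (syms.reverse.foldl (fun st item =>
          match PySem.List.remove? syms item with
          | some child => (child, cd + 1, pre ++ item) :: st
          | none => st) rest)

def variants_alt (symbols : List String) (depth : Int) (current_depth : Int) : List String :=
  variantsAltGo (nodesB symbols.length) depth [(symbols, current_depth, "")]

-- ===== PRECONDITION & SPEC =====
def Spec_variants (symbols : List String) (depth : Int) (current_depth : Int) (out : List String) : Prop := out = variants_alt symbols depth current_depth
instance (symbols : List String) (depth : Int) (current_depth : Int) (out : List String) : Decidable (Spec_variants symbols depth current_depth out) := by unfold Spec_variants; infer_instance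

-- ===== CLAIM (what is proved, stated in full; the proofs are below) =====
def Claim_equal_variants : Prop := ∀ (symbols : List String) (depth : Int) (current_depth : Int), Dom_variants symbols depth current_depth → Spec_variants symbols depth current_depth (variants symbols depth current_depth)

-- ===== LEMMAS AND PROOFS =====

-- what A emits for one stack frame of B
def emitF (depth : Int) (f : List String × Int × String) : List String :=
  (variantsGo (f.1.length + 1) f.1 depth f.2.1).map (fun t => f.2.2 ++ t)

def measureF (stack : List (List String × Int × String)) : Nat :=
  (stack.map (fun f => nodesB f.1.length)).sum

lemma remove?_length (l : List String) (x : String) (r : List String)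
    (h : PySem.List.remove? l x = some r) : r.length + 1 = l.length := by
  have hm : x ∈ l := by
    by_contra hx
    rw [(PySem.List.remove?_eq_none_iff l x).2 hx] at h
    simp at h
  rw [PySem.List.remove?_eq_some_erase l x hm] at h
  injection h with h'
  have h1 := List.length_erase_of_mem hm
  have h2 := List.length_pos_of_mem hm
  rw [← h']
  omega

lemma revFoldl_push {α β : Type} (l : List α) (g : α → Option β) (init : List β) :
    l.reverse.foldl (fun st x => (g x).toList ++ st) init = l.filterMap g ++ init := by
  induction l generalizing init with
  | nil => simp
  | cons x t ih =>
    rw [List.reverse_cons, List.foldl_append]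
    simp only [List.foldl_cons, List.foldl_nil, List.filterMap_cons]
    cases g x <;> simp [ih]

lemma flatMap_filterMap {α β γ : Type} (l : List α) (g : α → Option β) (h : β → List γ) :
    (l.filterMap g).flatMap h
      = l.flatMap (fun x => match g x with | some y => h y | none => []) := by
  induction l with
  | nil => rfl
  | cons x t ih =>
    simp only [List.filterMap_cons, List.flatMap_cons]
    cases g x <;> simp [ih]

-- one unfolding of A's recursion, with the inner fuel re-expressed from the child's length
lemma variantsGo_unfold (syms : List String) (depth cd : Int) :
    variantsGo (syms.length + 1) syms depth cd
      = (if syms = [] ∨ cd ≥ depth then [""] else []) ++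
        syms.flatMap (fun item =>
          match PySem.List.remove? syms item with
          | some s => (variantsGo (s.length + 1) s depth (cd + 1)).map (fun tail => item ++ tail)
          | none => []) := by
  rw [variantsGo, PySem.List.foldl_append_eq_flatMap]
  simp only [List.nil_append]
  congr 1
  apply List.flatMap_congr
  intro item _
  rcases h : PySem.List.remove? syms item with _ | s
  · rfl
  · have := remove?_length syms item s h
    simp only []
    rw [show syms.length = s.length + 1 from this.symm]

lemma nodesB_pos (n : Nat) : 0 < nodesB n := by
  cases n <;> simp [nodesB]

lemma measureF_append (a b : List (List String × Int × String)) :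
    measureF (a ++ b) = measureF a + measureF b := by
  simp [measureF]

lemma push_body_eq (syms : List String) (cd : Int) (pre : String) (rest : List (List String × Int × String)) :
    (syms.reverse.foldl (fun st item =>
        match PySem.List.remove? syms item with
        | some child => (child, cd + 1, pre ++ item) :: st
        | none => st) rest)
      = syms.reverse.foldl (fun st item =>
          ((PySem.List.remove? syms item).map (fun child => (child, cd + 1, pre ++ item))).toList
            ++ st) rest := by
  have hfun : (fun (st : List (List String × Int × String)) (item : String) =>
        match PySem.List.remove? syms item with
        | some child => (child, cd + 1, pre ++ item) :: st
        | none => st)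
      = (fun st item =>
          ((PySem.List.remove? syms item).map (fun child => (child, cd + 1, pre ++ item))).toList
            ++ st) := by
    funext st item
    rcases PySem.List.remove? syms item with _ | c <;> rfl
  rw [hfun]

-- the main invariant: with enough fuel, B's loop emits, frame by frame, what A emits
lemma altGo_eq (depth : Int) (fuel : Nat) (stack : List (List String × Int × String))
    (hf : measureF stack ≤ fuel) :
    variantsAltGo fuel depth stack = stack.flatMap (emitF depth) := by
  induction fuel generalizing stack with
  | zero =>
    cases stack with
    | nil => rfl
    | cons f rest =>
      exfalso
      have := nodesB_pos f.1.length
      simp [measureF] at hf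
      omega
  | succ fuel ih =>
    cases stack with
    | nil => rfl
    | cons f rest =>
      obtain ⟨syms, cd, pre⟩ := f
      rw [variantsAltGo]
      rw [push_body_eq]
      rw [revFoldl_push]
      · -- fuel bound for the new stack
        set g : String → Option (List String × Int × String) :=
          fun item => (PySem.List.remove? syms item).map (fun child => (child, cd + 1, pre ++ item)) with hg
        have hchild : ∀ fr ∈ syms.filterMap g, nodesB fr.1.length = nodesB (syms.length - 1) := by
          intro fr hfr
          rcases List.mem_filterMap.1 hfr with ⟨item, _, hgi⟩
          rcases h : PySem.List.remove? syms item with _ | s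
          · rw [hg] at hgi; simp [h] at hgi
          · rw [hg] at hgi; simp [h] at hgi
            have := remove?_length syms item s h
            rw [← hgi]
            show nodesB s.length = nodesB (syms.length - 1)
            congr 1
            omega
        have hlen : (syms.filterMap g).length ≤ syms.length := List.length_filterMap_le _ _
        have hsum : measureF (syms.filterMap g) ≤ syms.length * nodesB (syms.length - 1) := by
          have : ∀ x ∈ (syms.filterMap g).map (fun f => nodesB f.1.length),
              x ≤ nodesB (syms.length - 1) := by
            intro x hx
            rcases List.mem_map.1 hx with ⟨fr, hfr, hxe⟩
            rw [← hxe, hchild fr hfr]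
          calc measureF (syms.filterMap g)
              ≤ ((syms.filterMap g).map (fun f => nodesB f.1.length)).length
                  * nodesB (syms.length - 1) := by
                  simpa [measureF] using
                    List.sum_le_card_nsmul ((syms.filterMap g).map (fun f => nodesB f.1.length))
                      (nodesB (syms.length - 1)) this
            _ ≤ syms.length * nodesB (syms.length - 1) := by
                  simpa using Nat.mul_le_mul_right _ hlen
        have hmeas : measureF (syms.filterMap g ++ rest) ≤ fuel := by
          rw [measureF_append]
          have hstack : measureF ((syms, cd, pre) :: rest) = nodesB syms.length + measureF rest := by
            simp [measureF]
          have hn : syms.length * nodesB (syms.length - 1) + 1 ≤ nodesB syms.length := by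
            cases syms with
            | nil => simp [nodesB]
            | cons a t => simp only [List.length_cons, Nat.add_sub_cancel, nodesB]; omega
          rw [hstack] at hf
          omega
        rw [ih _ hmeas, List.flatMap_append]
        rw [List.flatMap_cons, ← List.append_assoc]
        congr 1
        -- the head frame's contribution matches one unfolding of A
        simp only [emitF]
        rw [variantsGo_unfold, List.map_append]
        congr 1
        · split_ifs <;> simp
        · rw [flatMap_filterMap, List.map_flatMap]
          apply List.flatMap_congr
          intro item _
          rcases h : PySem.List.remove? syms item with _ | c
          · rw [hg]; simp [h]
          · rw [hg]
            simp only [h, Option.map_some, emitF, List.map_map]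
            apply List.map_congr_left
            intro t _
            simp [String.append_assoc]

-- ===== VERDICT (by name: the statement is the Claim_ definition above) =====
theorem variants_spec : Claim_equal_variants := by
  intro symbols depth current_depth _
  unfold Spec_variants variants variants_alt
  rw [altGo_eq depth (nodesB symbols.length) [(symbols, current_depth, "")] (by simp [measureF])]
  simp [emitF]
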